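-- pv_equiv track=rewrite | github.com/Ap6pack/malwar | src/malwar/detectors/url_crawler/reputation.py | _domain_matches
-- ===== SOURCE A (Python) =====
-- def _domain_matches(domain: str, known: set[str]) -> bool:
--     """Check if *domain* matches any entry in *known* (exact or parent)."""
--     if domain in known:
--         return True
--     # Also match subdomains: e.g. "raw.github.com" should match "github.com"
--     parts = domain.split(".")
--     for i in range(1, len(parts)):
--         parent = ".".join(parts[i:])
--         if parent in known:
--             return True
--     return False
-- ===== SOURCE B (Python) =====
-- def _domain_matches(domain: str, known: set[str]) -> bool:
--     """Check if *domain* matches any entry in *known* (exact or parent)."""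
--     for entry in known:
--         if domain == entry or domain.endswith("." + entry):
--             return True
--     return False
-- ===== Notes on version B (the rewrite author's own statement) =====
-- stated objective: alternative
-- what changed: B iterates over the known set testing exact equality or a dot-aligned suffix with endswith, instead of generating every parent suffix of the domain via split/join and probing the set.
import Mathlib
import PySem

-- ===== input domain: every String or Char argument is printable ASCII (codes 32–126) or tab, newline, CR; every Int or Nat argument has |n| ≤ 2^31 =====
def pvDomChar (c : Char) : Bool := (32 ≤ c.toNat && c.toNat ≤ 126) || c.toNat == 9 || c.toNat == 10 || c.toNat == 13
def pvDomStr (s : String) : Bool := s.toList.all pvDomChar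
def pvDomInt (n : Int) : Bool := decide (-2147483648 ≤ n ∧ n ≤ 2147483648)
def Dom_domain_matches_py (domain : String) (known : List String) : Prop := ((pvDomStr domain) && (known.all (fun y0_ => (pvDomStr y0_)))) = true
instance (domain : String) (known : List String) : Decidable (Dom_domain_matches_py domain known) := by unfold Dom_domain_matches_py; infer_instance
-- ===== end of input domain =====

-- B iterates over the known set testing exact match or a dot-aligned suffix via endswith,
-- instead of generating every parent suffix of the domain via split/join and probing the set.


-- ===== PORT A =====
def domain_matches_py (domain : String) (known : List String) : Bool :=
  if known.contains domain then true
  else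
    -- sep "." is a nonempty literal, so split? is `some`; the getD default is never taken
    let parts : List String := (PySem.Str.split? domain ".").getD []
    (PySem.List.pyRange 1 (parts.length : Int)).any fun i =>
      known.contains (PySem.Str.join "." (PySem.List.slice parts (some i)))

-- ===== PORT B =====
def domain_matches_py_alt (domain : String) (known : List String) : Bool :=
  known.any fun entry =>
    -- String.ofList ('.' :: entry.toList) is exactly Python's "." + entry
    domain == entry || PySem.Str.endswith domain (String.ofList ('.' :: entry.toList))

-- ===== PRECONDITION & SPEC =====
def Spec_domain_matches_py (domain : String) (known : List String) (out : Bool) : Prop := out = domain_matches_py_alt domain known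
instance (domain : String) (known : List String) (out : Bool) : Decidable (Spec_domain_matches_py domain known out) := by unfold Spec_domain_matches_py; infer_instance

-- ===== CLAIM (what is proved, stated in full; the proofs are below) =====
def Claim_equal_domain_matches_py : Prop := ∀ (domain : String) (known : List String), Dom_domain_matches_py domain known → Spec_domain_matches_py domain known (domain_matches_py domain known)

-- ===== LEMMAS AND PROOFS =====

/-- Reference splitter: what `domain.split(".")` computes, as a plain structural recursion. -/
def splitDot : List Char → List (List Char)
  | [] => [[]]
  | c :: r => if c = '.' then [] :: splitDot r else (splitDot r).modifyHead (c :: ·)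

lemma splitDot_ne_nil (l : List Char) : splitDot l ≠ [] := by
  induction l with
  | nil => simp [splitDot]
  | cons c r ih =>
    simp only [splitDot]
    split_ifs
    · simp
    · cases h : splitDot r with
      | nil => exact absurd h ih
      | cons a t => simp

lemma go_eq_splitDot (fuel : Nat) (l cur : List Char) (acc : List (List Char))
    (h : l.length < fuel) :
    PySem.Chars.splitOn.go ['.'] fuel l cur acc
      = acc.reverse ++ (splitDot l).modifyHead (cur.reverse ++ ·) := by
  induction fuel generalizing l cur acc with
  | zero => omega
  | succ f ih =>
    cases l with
    | nil =>
      rw [PySem.Chars.splitOn.go]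
      · simp [splitDot]
      · omega
    | cons c r =>
      rw [PySem.Chars.splitOn.go]
      by_cases hc : c = '.'
      · subst hc
        have hp : List.isPrefixOf ['.'] ('.' :: r) = true := by simp [List.isPrefixOf]
        rw [if_pos hp]
        rw [ih _ _ _ (by simpa using Nat.lt_of_succ_lt_succ (by simpa using h))]
        simp [splitDot, show (fun x : List Char => x) = id from rfl]
      · have hp : List.isPrefixOf ['.'] (c :: r) = false := by
          simp [List.isPrefixOf]
          intro h'; exact hc h'.symm
        rw [if_neg (by simp [hp])]
        rw [ih _ _ _ (by simpa using Nat.lt_of_succ_lt_succ (by simpa using h))]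
        simp only [splitDot, if_neg hc, List.modifyHead_modifyHead]
        congr 1
        apply congrArg (fun f => List.modifyHead f _)
        funext x
        simp

lemma splitOn_eq_splitDot (d : List Char) :
    PySem.Chars.splitOn d ['.'] = splitDot d := by
  rw [PySem.Chars.splitOn, go_eq_splitDot _ _ _ _ (by omega)]
  simp [show (fun x : List Char => x) = id from rfl]

lemma join_cons_head (c : Char) (a : List Char) (t : List (List Char)) :
    PySem.Chars.join ['.'] ((c :: a) :: t) = c :: PySem.Chars.join ['.'] (a :: t) := by
  cases t with
  | nil => simp [PySem.Chars.join_singleton]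
  | cons b t' => simp [PySem.Chars.join_cons_cons]

lemma join_splitDot (d : List Char) :
    PySem.Chars.join ['.'] (splitDot d) = d := by
  induction d with
  | nil => simp [splitDot, PySem.Chars.join_singleton]
  | cons c r ih =>
    by_cases hc : c = '.'
    · subst hc
      simp only [splitDot, reduceIte]
      obtain ⟨a, t, ht⟩ : ∃ a t, splitDot r = a :: t := by
        cases h : splitDot r with
        | nil => exact absurd h (splitDot_ne_nil r)
        | cons a t => exact ⟨a, t, rfl⟩
      rw [ht] at ih ⊢
      simp [PySem.Chars.join_cons_cons, ih]
    · simp only [splitDot, if_neg hc]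
      obtain ⟨a, t, ht⟩ : ∃ a t, splitDot r = a :: t := by
        cases h : splitDot r with
        | nil => exact absurd h (splitDot_ne_nil r)
        | cons a t => exact ⟨a, t, rfl⟩
      rw [ht] at ih ⊢
      simp only [List.modifyHead_cons, join_cons_head, ih]

lemma drop_modifyHead_of_pos {α : Type} (f : α → α) (l : List α) (i : Nat) (h : 1 ≤ i) :
    (l.modifyHead f).drop i = l.drop i := by
  cases l with
  | nil => simp
  | cons a t =>
    cases i with
    | zero => omega
    | succ j => simp

lemma suffix_iff_parent (d e : List Char) :
    ('.' :: e) <:+ d ↔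
      ∃ i, 1 ≤ i ∧ i < (splitDot d).length ∧
        PySem.Chars.join ['.'] ((splitDot d).drop i) = e := by
  induction d generalizing e with
  | nil =>
    simp only [splitDot]
    constructor
    · intro h
      have := h.length_le
      simp at this
    · rintro ⟨i, h1, h2, -⟩
      simp at h2; omega
  | cons c r ih =>
    rw [List.suffix_cons_iff]
    by_cases hc : c = '.'
    · subst hc
      simp only [splitDot, reduceIte]
      constructor
      · rintro (heq | hsuf)
        · have her : e = r := by injection heq
          have h0 : 0 < (splitDot r).length := List.length_pos_of_ne_nil (splitDot_ne_nil r)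
          refine ⟨1, le_refl 1, by simp; omega, ?_⟩
          simp [join_splitDot r, her]
        · obtain ⟨i, h1, h2, h3⟩ := (ih e).mp hsuf
          refine ⟨i + 1, by omega, by simp; omega, ?_⟩
          simpa using h3
      · rintro ⟨i, h1, h2, h3⟩
        cases i with
        | zero => omega
        | succ j =>
          rw [List.drop_succ_cons] at h3
          simp only [List.length_cons] at h2
          cases j with
          | zero =>
            left
            rw [List.drop_zero] at h3
            rw [join_splitDot r] at h3
            rw [h3]
          | succ k =>
            right
            exact (ih e).mpr ⟨k + 1, by omega, by omega, h3⟩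
    · simp only [splitDot, if_neg hc]
      have hne : ¬ ('.' :: e = c :: r) := by
        intro h; injection h with h1 _; exact hc h1.symm
      rw [List.length_modifyHead]
      constructor
      · rintro (heq | hsuf)
        · exact absurd heq hne
        · obtain ⟨i, h1, h2, h3⟩ := (ih e).mp hsuf
          exact ⟨i, h1, h2, by rwa [drop_modifyHead_of_pos _ _ _ h1]⟩
      · rintro ⟨i, h1, h2, h3⟩
        right
        exact (ih e).mpr ⟨i, h1, h2, by rwa [drop_modifyHead_of_pos _ _ _ h1] at h3⟩

lemma parts_eq (domain : String) :
    (PySem.Str.split? domain ".").getD [] = (splitDot domain.toList).map String.ofList := by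
  simp [PySem.Str.split?, PySem.Chars.split?, splitOn_eq_splitDot]

lemma A_iff (domain : String) (known : List String) :
    domain_matches_py domain known = true ↔
      domain ∈ known ∨ ∃ j : Nat, 1 ≤ j ∧ j < (splitDot domain.toList).length ∧
        String.ofList (PySem.Chars.join ['.'] ((splitDot domain.toList).drop j)) ∈ known := by
  unfold domain_matches_py
  split_ifs with h
  · simp at h
    simp [h]
  · simp only [List.contains_eq_mem, decide_eq_true_eq] at h
    rw [List.any_eq_true]
    simp only [parts_eq]
    constructor
    · rintro ⟨i, hmem, hcon⟩
      rw [PySem.List.mem_pyRange_one] at hmem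
      obtain ⟨hi1, hi2⟩ := hmem
      refine Or.inr ⟨i.toNat, by omega, by simp only [List.length_map] at hi2; omega, ?_⟩
      rw [PySem.List.slice_from _ (by omega)] at hcon
      simp only [List.contains_eq_mem, decide_eq_true_eq] at hcon
      rw [← List.map_drop] at hcon
      simpa [PySem.Str.join, PySem.Chars.join, List.map_map, Function.comp_def] using hcon
    · rintro (hd | ⟨j, hj1, hj2, hj3⟩)
      · exact absurd hd h
      · refine ⟨(j : Int), ?_, ?_⟩
        · rw [PySem.List.mem_pyRange_one]
          constructor
          · omega
          · simp only [List.length_map]; omega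
        · rw [PySem.List.slice_from _ (by omega)]
          simp only [List.contains_eq_mem, decide_eq_true_eq]
          rw [← List.map_drop]
          simpa [PySem.Str.join, PySem.Chars.join, List.map_map, Function.comp_def] using hj3

lemma B_iff (domain : String) (known : List String) :
    domain_matches_py_alt domain known = true ↔
      ∃ e ∈ known, domain = e ∨ ('.' :: e.toList) <:+ domain.toList := by
  unfold domain_matches_py_alt
  rw [List.any_eq_true]
  apply exists_congr; intro e
  simp [PySem.Str.endswith, PySem.Chars.endswith, List.isSuffixOf_iff_suffix]

theorem a_eq_b (domain : String) (known : List String) :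
    domain_matches_py domain known = domain_matches_py_alt domain known := by
  rw [Bool.eq_iff_iff, A_iff, B_iff]
  constructor
  · rintro (hd | ⟨j, hj1, hj2, hj3⟩)
    · exact ⟨domain, hd, Or.inl rfl⟩
    · refine ⟨_, hj3, Or.inr ?_⟩
      rw [suffix_iff_parent]
      exact ⟨j, hj1, hj2, by simp⟩
  · rintro ⟨e, he, (rfl | hsuf)⟩
    · exact Or.inl he
    · rw [suffix_iff_parent] at hsuf
      obtain ⟨j, hj1, hj2, hj3⟩ := hsuf
      refine Or.inr ⟨j, hj1, hj2, ?_⟩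
      rw [hj3, String.ofList_toList]
      exact he

-- ===== VERDICT (by name: the statement is the Claim_ definition above) =====
theorem domain_matches_py_spec : Claim_equal_domain_matches_py := by
  intro domain known _
  unfold Spec_domain_matches_py
  exact a_eq_b domain known
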